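-- pv_equiv track=rewrite | github.com/quanhua92/aipriceaction-old | calculate_pnl_correct.py | format_vnd
-- ===== SOURCE A (Python) =====
-- def format_vnd(amount):
--     """Format VND amount with Vietnamese dot separators (e.g., 28.085.600)"""
--     if amount == 0:
--         return "0"
--
--     # Convert to integer for formatting
--     amount_int = int(abs(amount))
--
--     # Convert to string and reverse for easier processing
--     amount_str = str(amount_int)[::-1]
--
--     # Add dots every 3 digits
--     formatted_parts = []
--     for i in range(0, len(amount_str), 3):
--         formatted_parts.append(amount_str[i:i+3])
--
--     # Join with dots and reverse back
--     formatted = '.'.join(formatted_parts)[::-1]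
--
--     # Add sign if negative
--     if amount < 0:
--         formatted = '-' + formatted
--
--     return formatted
-- ===== SOURCE B (Python) =====
-- def format_vnd(amount):
--     """Format VND amount with Vietnamese dot separators (e.g., 28.085.600)"""
--     def fmt(n):
--         if n < 1000:
--             return str(n)
--         return fmt(n // 1000) + "." + str(n % 1000).zfill(3)
--     s = fmt(int(abs(amount)))
--     return "-" + s if amount < 0 else s
-- ===== Notes on version B (the rewrite author's own statement) =====
-- stated objective: simpler
-- what changed: Replaces the reverse-string/range-step-3 chunking loop, join and second reversal by a direct arithmetic recursion on n // 1000 that emits zero-padded 3-digit groups via str(n % 1000).zfill(3).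
import Mathlib
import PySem

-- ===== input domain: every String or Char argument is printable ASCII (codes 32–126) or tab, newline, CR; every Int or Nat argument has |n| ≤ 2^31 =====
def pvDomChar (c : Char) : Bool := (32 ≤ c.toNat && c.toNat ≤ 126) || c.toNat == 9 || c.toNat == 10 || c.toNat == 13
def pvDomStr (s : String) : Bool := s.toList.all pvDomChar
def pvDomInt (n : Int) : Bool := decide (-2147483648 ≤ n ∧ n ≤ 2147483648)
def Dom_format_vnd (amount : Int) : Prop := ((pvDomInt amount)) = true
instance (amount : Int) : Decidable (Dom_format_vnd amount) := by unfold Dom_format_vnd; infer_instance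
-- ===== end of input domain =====

-- B replaces A's reverse/chunk/join/reverse string loop by arithmetic recursion on n // 1000 (objective: simpler).

-- ===== PORT A =====
-- the 'for i in range(0, len(amount_str), 3): formatted_parts.append(amount_str[i:i+3])' loop
def formatParts (cs : List Char) : List (List Char) :=
  (PySem.List.pyRange 0 (cs.length : Int) 3).foldl
    (fun acc i => acc ++ [PySem.List.slice cs (some i) (some (i + 3))]) []

def format_vnd (amount : Int) : String :=
  if amount = 0 then "0"
  else
    let amount_int : Int := |amount|                                      -- int(abs(amount))
    let amount_str : List Char := (PySem.Int.toChars amount_int).reverse  -- str(amount_int)[::-1]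
    let formatted_parts : List (List Char) := formatParts amount_str
    let formatted : List Char := (PySem.Chars.join ['.'] formatted_parts).reverse
    if amount < 0 then String.ofList ('-' :: formatted) else String.ofList formatted

-- ===== PORT B =====
-- fmt(n): str(n) if n < 1000, else fmt(n // 1000) + "." + str(n % 1000).zfill(3)
def fmtChars (n : Nat) : List Char :=
  if n < 1000 then PySem.Int.toChars (n : Int)
  else fmtChars (n / 1000) ++ '.' :: PySem.Chars.zfill (PySem.Int.toChars ((n % 1000 : Nat) : Int)) 3
termination_by n
decreasing_by exact Nat.div_lt_self (by omega) (by omega)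

def format_vnd_alt (amount : Int) : String :=
  let s := fmtChars amount.natAbs
  if amount < 0 then String.ofList ('-' :: s) else String.ofList s

-- ===== PRECONDITION & SPEC =====
def Spec_format_vnd (amount : Int) (out : String) : Prop := out = format_vnd_alt amount
instance (amount : Int) (out : String) : Decidable (Spec_format_vnd amount out) := by unfold Spec_format_vnd; infer_instance

-- ===== CLAIM (what is proved, stated in full; the proofs are below) =====
def Claim_equal_format_vnd : Prop := ∀ (amount : Int), Dom_format_vnd amount → Spec_format_vnd amount (format_vnd amount)

-- ===== LEMMAS AND PROOFS =====

-- chunks of 3 from the front: the shape of A's slicing loop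
def chunks3 (cs : List Char) : List (List Char) :=
  if _h : cs = [] then [] else cs.take 3 :: chunks3 (cs.drop 3)
termination_by cs.length
decreasing_by
  have : cs.length ≠ 0 := by simpa using _h
  simp only [List.length_drop]; omega

lemma chunks3_nil : chunks3 [] = [] := by rw [chunks3]; rfl

lemma chunks3_cons (cs : List Char) (h : cs ≠ []) :
    chunks3 cs = cs.take 3 :: chunks3 (cs.drop 3) := by
  conv_lhs => rw [chunks3]
  rw [dif_neg h]

lemma pyRange3_nil (a b : Int) (h : b ≤ a) : PySem.List.pyRange a b 3 = [] := by
  rw [PySem.List.pyRange_of_pos a b (by norm_num)]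
  rw [if_neg (by omega)]
  simp

lemma pyRange3_cons (a b : Int) (h : a < b) :
    PySem.List.pyRange a b 3 = a :: PySem.List.pyRange (a + 3) b 3 := by
  rw [PySem.List.pyRange_of_pos a b (by norm_num),
      PySem.List.pyRange_of_pos (a + 3) b (by norm_num), if_pos h]
  have h2 : ((b - a + 3 - 1) / 3).toNat
      = (if a + 3 < b then ((b - (a + 3) + 3 - 1) / 3).toNat else 0) + 1 := by
    split_ifs with hb <;> omega
  rw [h2, List.range_succ_eq_map]
  simp only [List.map_cons, List.map_map, Nat.cast_zero, mul_zero, add_zero]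
  congr 1
  refine List.map_congr_left fun k _ => ?_
  simp only [Function.comp_apply, Nat.cast_succ]
  ring

lemma foldl_slice_chunks_aux : ∀ (m : Nat) (cs : List Char) (a : Nat) (init : List (List Char)),
    cs.length - a ≤ m →
    (PySem.List.pyRange (a : Int) (cs.length : Int) 3).foldl
      (fun acc i => acc ++ [PySem.List.slice cs (some i) (some (i + 3))]) init
    = init ++ chunks3 (cs.drop a) := by
  intro m
  induction m with
  | zero =>
    intro cs a init h
    have hle : cs.length ≤ a := by omega
    rw [pyRange3_nil _ _ (by exact_mod_cast hle)]
    rw [List.drop_eq_nil_of_le hle, chunks3_nil, List.append_nil]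
    rfl
  | succ m ih =>
    intro cs a init h
    by_cases hab : a < cs.length
    · rw [pyRange3_cons _ _ (by exact_mod_cast hab)]
      simp only [List.foldl_cons]
      have hcast : ((a : Int) + 3) = ((a + 3 : Nat) : Int) := by push_cast; ring
      rw [hcast, ih cs (a + 3) _ (by omega)]
      have hsl : PySem.List.slice cs (some (a : Int)) (some ((a + 3 : Nat) : Int))
          = (cs.drop a).take 3 := by
        have := PySem.List.slice_natCast_add cs a 3
        push_cast at this ⊢
        exact this
      rw [hsl]
      have hne : cs.drop a ≠ [] := by
        intro hnil
        have := congrArg List.length hnil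
        simp only [List.length_drop, List.length_nil] at this
        omega
      rw [chunks3_cons _ hne]
      have hdd : (cs.drop a).drop 3 = cs.drop (a + 3) := by
        rw [List.drop_drop]
      rw [hdd, List.append_assoc]
      rfl
    · have hle : cs.length ≤ a := by omega
      rw [pyRange3_nil _ _ (by exact_mod_cast hle)]
      rw [List.drop_eq_nil_of_le hle, chunks3_nil, List.append_nil]
      rfl

lemma formatParts_eq (cs : List Char) : formatParts cs = chunks3 cs := by
  have h := foldl_slice_chunks_aux cs.length cs 0 [] (by omega)
  simpa [formatParts] using h

def myDigits (n : Nat) : List Char := ((Nat.digits 10 n).map Nat.digitChar).reverse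

lemma myDigits_length (n : Nat) : (myDigits n).length = (Nat.digits 10 n).length := by
  simp [myDigits]

lemma toDigitsCore_eq : ∀ (f n : Nat) (l : List Char), n < f →
    Nat.toDigitsCore 10 f n l = (if n = 0 then ['0'] else myDigits n) ++ l := by
  intro f
  induction f with
  | zero => intro n l h; omega
  | succ f ih =>
    intro n l h
    rw [Nat.toDigitsCore]
    by_cases hdiv : n / 10 = 0
    · have hn10 : n < 10 := by omega
      rw [if_pos hdiv]
      by_cases hn0 : n = 0
      · subst hn0; simp [Nat.digitChar]
      · rw [if_neg hn0]
        have hd : Nat.digits 10 n = [n % 10] := by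
          rw [Nat.digits_def' (by norm_num) (by omega), hdiv]
          simp
        simp [myDigits, hd]
    · rw [if_neg hdiv]
      have hn0 : n ≠ 0 := by omega
      have hlt : n / 10 < f := by
        have := Nat.div_lt_self (Nat.pos_of_ne_zero hn0) (by norm_num : 1 < 10)
        omega
      rw [ih (n / 10) _ hlt, if_neg hdiv]
      rw [if_neg hn0]
      have hd : Nat.digits 10 n = n % 10 :: Nat.digits 10 (n / 10) := by
        exact Nat.digits_def' (by norm_num) (Nat.pos_of_ne_zero hn0)
      simp [myDigits, hd]

lemma toDigits_eq (n : Nat) : Nat.toDigits 10 n = if n = 0 then ['0'] else myDigits n := by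
  have := toDigitsCore_eq (n + 1) n [] (by omega)
  simpa [Nat.toDigits] using this

lemma toChars_natCast (n : Nat) : PySem.Int.toChars (n : Int) = Nat.toDigits 10 n := by
  simp [PySem.Int.toChars]

lemma toChars_len_le (n : Nat) (h : n < 1000) :
    (PySem.Int.toChars (n : Int)).length ≤ 3 := by
  rw [toChars_natCast, toDigits_eq]
  split_ifs with h0
  · simp
  · rw [myDigits_length]
    exact (Nat.digits_length_le_iff (by norm_num) n).mpr (by norm_num; omega)

lemma toChars_ne_nil (n : Nat) : PySem.Int.toChars (n : Int) ≠ [] := by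
  rw [toChars_natCast, toDigits_eq]
  split_ifs with h0
  · simp
  · simp only [myDigits, ne_eq, List.reverse_eq_nil_iff, List.map_eq_nil_iff]
    exact Nat.digits_ne_nil_iff_ne_zero.mpr h0

lemma digitChar_not_sign (d : Nat) (hd : d < 10) :
    ¬(Nat.digitChar d = '+' ∨ Nat.digitChar d = '-') := by
  interval_cases d <;> decide

lemma zfill_toChars (r : Nat) (h : r < 1000) :
    PySem.Chars.zfill (PySem.Int.toChars (r : Int)) 3
      = List.replicate (3 - (Nat.digits 10 r).length) '0' ++ myDigits r := by
  by_cases h0 : r = 0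
  · subst h0
    have : PySem.Int.toChars ((0 : Nat) : Int) = ['0'] := by decide
    rw [this]
    simp [myDigits]
    decide
  · rw [toChars_natCast, toDigits_eq, if_neg h0]
    have hlen : (myDigits r).length = (Nat.digits 10 r).length := myDigits_length r
    have hlen3 : (Nat.digits 10 r).length ≤ 3 :=
      (Nat.digits_length_le_iff (by norm_num) r).mpr (by norm_num; omega)
    obtain ⟨c, rest, hcr⟩ : ∃ c rest, myDigits r = c :: rest := by
      have hne : myDigits r ≠ [] := by
        simp only [myDigits, ne_eq, List.reverse_eq_nil_iff, List.map_eq_nil_iff]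
        exact Nat.digits_ne_nil_iff_ne_zero.mpr h0
      cases hm : myDigits r with
      | nil => exact absurd hm hne
      | cons c rest => exact ⟨c, rest, rfl⟩
    have hc : ¬(c = '+' ∨ c = '-') := by
      have hmem : c ∈ myDigits r := by rw [hcr]; exact List.mem_cons_self
      simp only [myDigits, List.mem_reverse, List.mem_map] at hmem
      obtain ⟨d, hdm, hdc⟩ := hmem
      have hd10 : d < 10 := Nat.digits_lt_base (by norm_num) hdm
      rw [← hdc]
      exact digitChar_not_sign d hd10
    rw [hcr]
    by_cases h3 : (c :: rest).length = 3
    · have : PySem.Chars.zfill (c :: rest) 3 = c :: rest := by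
        unfold PySem.Chars.zfill
        rw [if_pos (by rw [h3]; norm_num)]
      rw [this]
      have : 3 - (Nat.digits 10 r).length = 0 := by
        rw [← hlen, hcr, h3]
      rw [this]
      simp
    · have hlt : (c :: rest).length < 3 := by
        have : (c :: rest).length ≤ 3 := by rw [← hcr, hlen]; exact hlen3
        omega
      unfold PySem.Chars.zfill
      rw [if_neg (by omega)]
      dsimp only
      rw [if_neg hc]
      have h33 : ((3 : Int)).toNat = 3 := rfl
      rw [h33, ← hcr, hlen]

lemma toChars_decomp (n : Nat) (h : 1000 ≤ n) :
    PySem.Int.toChars (n : Int)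
      = PySem.Int.toChars ((n / 1000 : Nat) : Int)
        ++ List.replicate (3 - (Nat.digits 10 (n % 1000)).length) '0'
        ++ myDigits (n % 1000) := by
  have hq0 : n / 1000 ≠ 0 := by
    intro hq; omega
  have hn0 : n ≠ 0 := by omega
  have hr : n % 1000 < 1000 := Nat.mod_lt _ (by norm_num)
  have hlenr : (Nat.digits 10 (n % 1000)).length ≤ 3 :=
    (Nat.digits_length_le_iff (by norm_num) _).mpr (by norm_num; omega)
  have key := Nat.digits_append_zeroes_append_digits
    (b := 10) (k := 3 - (Nat.digits 10 (n % 1000)).length) (m := n / 1000) (n := n % 1000)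
    (by norm_num) (Nat.pos_of_ne_zero hq0)
  have hexp : (Nat.digits 10 (n % 1000)).length + (3 - (Nat.digits 10 (n % 1000)).length) = 3 := by
    omega
  rw [hexp] at key
  have harith : n % 1000 + 10 ^ 3 * (n / 1000) = n := by
    have := Nat.mod_add_div n 1000
    norm_num
    omega
  rw [harith] at key
  rw [toChars_natCast n, toDigits_eq, if_neg hn0]
  rw [toChars_natCast (n / 1000), toDigits_eq, if_neg hq0]
  unfold myDigits
  rw [← key]
  simp [List.map_append, List.reverse_append, List.map_replicate, List.reverse_replicate,
    show Nat.digitChar 0 = '0' from rfl]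

lemma core_eq_fmt (n : Nat) :
    (PySem.Chars.join ['.'] (chunks3 (PySem.Int.toChars (n : Int)).reverse)).reverse
      = fmtChars n := by
  induction n using Nat.strong_induction_on with
  | _ n ih =>
    by_cases h : n < 1000
    · rw [fmtChars, if_pos h]
      have hle : (PySem.Int.toChars (n : Int)).length ≤ 3 := toChars_len_le n h
      have hne : (PySem.Int.toChars (n : Int)).reverse ≠ [] := by
        simpa using toChars_ne_nil n
      rw [chunks3_cons _ hne]
      rw [List.take_of_length_le (by simpa using hle)]
      rw [List.drop_eq_nil_of_le (by simpa using hle)]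
      rw [chunks3_nil, PySem.Chars.join_singleton, List.reverse_reverse]
    · rw [not_lt] at h
      rw [fmtChars, if_neg (by omega)]
      rw [toChars_decomp n h]
      set q := n / 1000 with hq
      set r := n % 1000 with hr
      set A := PySem.Int.toChars ((q : Nat) : Int) with hA
      set B := List.replicate (3 - (Nat.digits 10 r).length) '0' with hB
      set C := myDigits r with hC
      have hrev : (A ++ B ++ C).reverse = (C.reverse ++ B) ++ A.reverse := by
        simp [List.reverse_append, hB, List.reverse_replicate, List.append_assoc]
      rw [hrev]
      have hlen3 : (C.reverse ++ B).length = 3 := by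
        have h1 : C.length = (Nat.digits 10 r).length := myDigits_length r
        have h2 : (Nat.digits 10 r).length ≤ 3 :=
          (Nat.digits_length_le_iff (by norm_num) _).mpr (by norm_num; omega)
        simp [hB, h1]
        omega
      have hne : (C.reverse ++ B) ++ A.reverse ≠ [] := by
        intro hnil
        have := congrArg List.length hnil
        simp only [List.length_append, hlen3, List.length_nil] at this
        omega
      rw [chunks3_cons _ hne]
      rw [List.take_left' hlen3, List.drop_left' hlen3]
      have hAne : A.reverse ≠ [] := by
        simpa [hA] using toChars_ne_nil q
      rw [chunks3_cons _ hAne]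
      rw [PySem.Chars.join_cons_cons]
      have hjoin : PySem.Chars.join ['.'] (A.reverse.take 3 :: chunks3 (A.reverse.drop 3))
          = PySem.Chars.join ['.'] (chunks3 A.reverse) := by
        rw [chunks3_cons _ hAne]
      rw [hjoin]
      have hihq : (PySem.Chars.join ['.'] (chunks3 A.reverse)).reverse = fmtChars q := by
        have hqlt : q < n := by
          rw [hq]; exact Nat.div_lt_self (by omega) (by norm_num)
        exact ih q hqlt
      have hzf : PySem.Chars.zfill (PySem.Int.toChars ((r : Nat) : Int)) 3 = B ++ C := by
        rw [zfill_toChars r (by rw [hr]; exact Nat.mod_lt _ (by norm_num))]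
      rw [hzf]
      simp only [List.reverse_append, List.reverse_cons]
      rw [hihq]
      simp [hB, List.reverse_replicate]

-- ===== VERDICT (by name: the statement is the Claim_ definition above) =====
theorem format_vnd_spec : Claim_equal_format_vnd := by
  intro amount _
  unfold Spec_format_vnd format_vnd format_vnd_alt
  by_cases h0 : amount = 0
  · subst h0
    norm_num
    rw [fmtChars]
    norm_num
    rfl
  · rw [if_neg h0]
    have habs : |amount| = ((amount.natAbs : Nat) : Int) := Int.abs_eq_natAbs amount
    simp only [habs, formatParts_eq, core_eq_fmt]
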